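-- pv_equiv track=rewrite | github.com/ayderGH/tvim_compiler | tvim.py | _check_balance_of_parantheses
-- ===== SOURCE A (Python) =====
-- def _check_balance_of_parantheses(s):
--     counter = 0
--     for ch in s:
--         if ch == '{':
--             counter += 1
--         elif ch == '}':
--             counter -= 1
--     return counter
-- ===== SOURCE B (Python) =====
-- def _check_balance_of_parantheses(s):
--     # Divide and conquer: the brace balance of a string is the sum of the
--     # balances of its two halves; base case is a single character.
--     if len(s) <= 1:
--         return 1 if s == '{' else (-1 if s == '}' else 0)
--     m = len(s) // 2
--     return _check_balance_of_parantheses(s[:m]) + _check_balance_of_parantheses(s[m:])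
-- ===== Notes on version B (the rewrite author's own statement) =====
-- stated objective: alternative
-- what changed: Replaced A's single-pass branching accumulator loop with a divide-and-conquer recursion: split the string in half, compute each half's balance recursively, and add (correct because balance is additive under concatenation).
import Mathlib
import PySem

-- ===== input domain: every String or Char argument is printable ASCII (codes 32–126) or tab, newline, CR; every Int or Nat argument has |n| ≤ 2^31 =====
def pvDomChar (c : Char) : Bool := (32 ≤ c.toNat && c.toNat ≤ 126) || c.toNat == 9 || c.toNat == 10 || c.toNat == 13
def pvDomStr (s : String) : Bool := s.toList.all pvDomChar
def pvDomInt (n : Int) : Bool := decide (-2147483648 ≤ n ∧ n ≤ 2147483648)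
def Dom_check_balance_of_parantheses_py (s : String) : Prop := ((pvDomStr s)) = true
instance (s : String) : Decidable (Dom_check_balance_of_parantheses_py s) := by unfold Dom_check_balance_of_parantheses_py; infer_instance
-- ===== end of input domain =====

-- B replaces A's single-pass accumulator loop by a divide-and-conquer recursion
-- (balance of a string = sum of the balances of its two halves): alternative structure, not faster.

-- ===== PORT A =====
def check_balance_of_parantheses_py (s : String) : Int :=
  s.toList.foldl (fun counter ch =>
    if ch == '{' then counter + 1
    else if ch == '}' then counter - 1
    else counter) 0

-- ===== PORT B =====
-- s[:m] / s[m:] with 0 ≤ m ≤ len are exactly take/drop of the character list.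
def pvBalanceGo (l : List Char) : Int :=
  if l.length ≤ 1 then
    (if l = ['{'] then 1 else if l = ['}'] then -1 else 0)
  else
    pvBalanceGo (l.take (l.length / 2)) + pvBalanceGo (l.drop (l.length / 2))
termination_by l.length
decreasing_by
  · simp only [List.length_take]; omega
  · simp only [List.length_drop]; omega

def check_balance_of_parantheses_py_alt (s : String) : Int :=
  pvBalanceGo s.toList

-- ===== PRECONDITION & SPEC =====
def Spec_check_balance_of_parantheses_py (s : String) (out : Int) : Prop := out = check_balance_of_parantheses_py_alt s
instance (s : String) (out : Int) : Decidable (Spec_check_balance_of_parantheses_py s out) := by unfold Spec_check_balance_of_parantheses_py; infer_instance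

-- ===== CLAIM (what is proved, stated in full; the proofs are below) =====
def Claim_equal_check_balance_of_parantheses_py : Prop := ∀ (s : String), Dom_check_balance_of_parantheses_py s → Spec_check_balance_of_parantheses_py s (check_balance_of_parantheses_py s)

-- ===== LEMMAS AND PROOFS =====

-- B's recursion computes count '{' minus count '}' (strong induction on length).
theorem pvBalanceGo_eq :
    ∀ (n : Nat) (l : List Char), l.length = n →
      pvBalanceGo l = (l.count '{' : Int) - (l.count '}' : Int) := by
  intro n
  induction n using Nat.strong_induction_on with
  | _ n ih =>
    intro l hl
    rw [pvBalanceGo]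
    by_cases h : l.length ≤ 1
    · simp only [h, if_true]
      match l, h with
      | [], _ => simp
      | [c], _ =>
        by_cases h1 : c = '{'
        · simp [h1]
        · by_cases h2 : c = '}'
          · simp [h2]
          · simp [h1, h2]
    · simp only [h, if_false]
      have hlen : 2 ≤ l.length := by omega
      have h1 : (l.take (l.length / 2)).length < n := by
        simp only [List.length_take]; omega
      have h2 : (l.drop (l.length / 2)).length < n := by
        simp only [List.length_drop]; omega
      rw [ih _ h1 _ rfl, ih _ h2 _ rfl]
      conv_rhs => rw [← List.take_append_drop (l.length / 2) l]
      rw [List.count_append, List.count_append]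
      push_cast
      ring

-- A's fold shifted by an initial accumulator
theorem foldl_balance (l : List Char) :
    ∀ a : Int, l.foldl (fun counter ch =>
      if ch == '{' then counter + 1
      else if ch == '}' then counter - 1
      else counter) a = a + (l.count '{' : Int) - (l.count '}' : Int) := by
  induction l with
  | nil => intro a; simp
  | cons h t ih =>
    intro a
    simp only [List.foldl_cons, ih, List.count_cons]
    by_cases h1 : h == '{'
    · have : (h == '}') = false := by
        have := beq_iff_eq.mp h1; subst this; decide
      simp [h1, this]; ring
    · by_cases h2 : h == '}'
      · simp [h1, h2]; ring
      · simp [h1, h2]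

-- ===== VERDICT (by name: the statement is the Claim_ definition above) =====
theorem check_balance_of_parantheses_py_spec : Claim_equal_check_balance_of_parantheses_py := by
  intro s _
  unfold Spec_check_balance_of_parantheses_py check_balance_of_parantheses_py check_balance_of_parantheses_py_alt
  rw [foldl_balance s.toList 0, pvBalanceGo_eq s.toList.length s.toList rfl]
  ring
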